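-- pv_equiv track=rewrite | github.com/GuigonGaelle/RLGchecker | RLGchecker.py | overlapDistance
-- ===== SOURCE A (Python) =====
-- def overlapDistance(mins, maxs):
--     distMin = None
--     i_min = 0
--     while i_min < len(mins):
--         i_max = 0
--         while i_max < len(maxs):
--             if i_min != i_max: # To avoid calculating the distance with yourself
--                 dist = maxs[i_max] - mins[i_min]
--                 if distMin == None or dist < distMin:
--                      distMin = dist
--             i_max += 1
--         i_min += 1
--     return distMin
-- ===== SOURCE B (Python) =====
-- def overlapDistance(mins, maxs):
--     if not mins or not maxs:
--         return None
--     # index of a smallest value in maxs, plus the runner-up value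
--     j1 = min(range(len(maxs)), key=lambda j: maxs[j])
--     m1 = maxs[j1]
--     m2 = min((maxs[j] for j in range(len(maxs)) if j != j1), default=None)
--     # largest mins entry whose index differs from j1
--     big1 = max((mins[i] for i in range(len(mins)) if i != j1), default=None)
--     cands = []
--     if big1 is not None:
--         cands.append(m1 - big1)
--     if j1 < len(mins) and m2 is not None:
--         cands.append(m2 - mins[j1])
--     return min(cands, default=None)
-- ===== Notes on version B (the rewrite author's own statement) =====
-- stated objective: faster
-- what changed: Replaces the nested all-pairs scan with O(n+m) single passes: the smallest maxs value (with its index j1) plus its runner-up, and the largest mins entry at an index other than j1, determine the minimum of maxs[j]-mins[i] over i!=j.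
import Mathlib
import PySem

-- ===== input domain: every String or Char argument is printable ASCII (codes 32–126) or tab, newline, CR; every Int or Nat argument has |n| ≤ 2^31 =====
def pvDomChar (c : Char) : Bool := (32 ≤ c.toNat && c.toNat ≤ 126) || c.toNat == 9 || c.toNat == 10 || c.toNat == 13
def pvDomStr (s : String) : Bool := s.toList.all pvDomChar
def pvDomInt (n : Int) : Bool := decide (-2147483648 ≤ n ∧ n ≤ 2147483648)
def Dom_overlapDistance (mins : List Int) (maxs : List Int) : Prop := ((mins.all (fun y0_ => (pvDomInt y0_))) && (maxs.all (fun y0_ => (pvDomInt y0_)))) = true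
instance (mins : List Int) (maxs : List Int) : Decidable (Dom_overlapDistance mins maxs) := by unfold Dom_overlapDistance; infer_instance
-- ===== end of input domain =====

-- B replaces A's O(n·m) all-pairs scan with O(n+m) passes: the least value of maxs
-- (with its index j1) and its runner-up, plus the greatest mins entry at an index ≠ j1,
-- determine the minimum of maxs[j]-mins[i] over i≠j.  Objective: faster (asymptotic).

-- ===== PORT A =====
-- the running-minimum update of A's innermost 'if' (distMin == None or dist < distMin)
def pvStep (dm : Option Int) (dist : Int) : Option Int :=
  match dm with
  | none => some dist
  | some d => if dist < d then some dist else some d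

-- A: two nested while-loops over the index ranges, threading distMin
def overlapDistance (mins : List Int) (maxs : List Int) : Option Int :=
  (List.range mins.length).foldl
    (fun distMin i_min =>
      (List.range maxs.length).foldl
        (fun dm i_max =>
          if i_min ≠ i_max then pvStep dm (maxs.getD i_max 0 - mins.getD i_min 0)
          else dm)
        distMin)
    none

-- ===== PORT B =====
-- Source B's min(range(len(maxs)), key=lambda j: maxs[j])
def pvArgmin (maxs : List Int) : Nat :=
  (List.range maxs.length).foldl
    (fun j1 j => if maxs.getD j 0 < maxs.getD j1 0 then j else j1) 0

def overlapDistance_alt (mins : List Int) (maxs : List Int) : Option Int :=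
  if mins.isEmpty || maxs.isEmpty then none
  else
    let j1 := pvArgmin maxs
    let m1 := maxs.getD j1 0
    let m2 := (((List.range maxs.length).filter (fun j => j ≠ j1)).map
                 (fun j => maxs.getD j 0)).min?
    let big1 := (((List.range mins.length).filter (fun i => i ≠ j1)).map
                 (fun i => mins.getD i 0)).max?
    let cands :=
      (match big1 with | some b => [m1 - b] | none => []) ++
      (match m2 with
       | some v => if j1 < mins.length then [v - mins.getD j1 0] else []
       | none => [])
    cands.min?

-- ===== PRECONDITION & SPEC =====
def Spec_overlapDistance (mins : List Int) (maxs : List Int) (out : Option Int) : Prop := out = overlapDistance_alt mins maxs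
instance (mins : List Int) (maxs : List Int) (out : Option Int) : Decidable (Spec_overlapDistance mins maxs out) := by unfold Spec_overlapDistance; infer_instance

-- ===== CLAIM (what is proved, stated in full; the proofs are below) =====
def Claim_equal_overlapDistance : Prop := ∀ (mins : List Int) (maxs : List Int), Dom_overlapDistance mins maxs → Spec_overlapDistance mins maxs (overlapDistance mins maxs)

-- ===== LEMMAS AND PROOFS =====

-- the full list of pair distances A scans
def pvL (mins : List Int) (maxs : List Int) : List Int :=
  (List.range mins.length).flatMap
    (fun i => ((List.range maxs.length).filter (fun j => i ≠ j)).map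
        (fun j => maxs.getD j 0 - mins.getD i 0))

theorem pvStep_some (d x : Int) : pvStep (some d) x = some (min d x) := by
  rcases Int.lt_or_le x d with h | h
  · rw [pvStep, if_pos h, min_eq_right (le_of_lt h)]
  · rw [pvStep, if_neg (not_lt.mpr h), min_eq_left h]

theorem foldl_pvStep_some (l : List Int) (d : Int) :
    l.foldl pvStep (some d) = some (l.foldl min d) := by
  induction l generalizing d with
  | nil => rfl
  | cons a as ih => simp [List.foldl, pvStep_some, ih]

theorem foldl_pvStep_none (l : List Int) : l.foldl pvStep none = l.min? := by
  cases l with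
  | nil => rfl
  | cons a as => simp [List.foldl, pvStep, List.min?, foldl_pvStep_some]

theorem inner_fold_eq (i : Nat) (f : Nat → Int) (l : List Nat) (dm : Option Int) :
    l.foldl (fun dm j => if i ≠ j then pvStep dm (f j) else dm) dm
      = ((l.filter (fun j => i ≠ j)).map f).foldl pvStep dm := by
  induction l generalizing dm with
  | nil => rfl
  | cons a as ih =>
    simp only [List.foldl_cons, List.filter_cons]
    rcases Decidable.em (i = a) with h | h
    · rw [if_neg (by simp [h]), if_neg (by simp [h])]
      exact ih dm
    · rw [if_pos h, if_pos (by simp [h])]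
      simp only [List.map_cons, List.foldl_cons]
      exact ih _

theorem outer_fold_eq (g : Nat → List Int) (l : List Nat) (dm : Option Int) :
    l.foldl (fun dm i => (g i).foldl pvStep dm) dm = (l.flatMap g).foldl pvStep dm := by
  induction l generalizing dm with
  | nil => rfl
  | cons a as ih => simp [List.foldl, List.flatMap_cons, List.foldl_append, ih]

theorem A_eq_min (mins maxs : List Int) :
    overlapDistance mins maxs = (pvL mins maxs).min? := by
  unfold overlapDistance pvL
  rw [← foldl_pvStep_none, ← outer_fold_eq]
  congr 1
  funext dm i
  rw [inner_fold_eq]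

-- membership in pvL
theorem mem_pvL {mins maxs : List Int} {x : Int} :
    x ∈ pvL mins maxs ↔
      ∃ i < mins.length, ∃ j < maxs.length, i ≠ j ∧
        x = maxs.getD j 0 - mins.getD i 0 := by
  simp only [pvL, List.mem_flatMap, List.mem_map, List.mem_filter, List.mem_range]
  constructor
  · rintro ⟨i, hi, j, ⟨hj, hij⟩, hx⟩
    exact ⟨i, hi, j, hj, by simpa using hij, hx.symm⟩
  · rintro ⟨i, hi, j, hj, hij, hx⟩
    exact ⟨i, hi, j, ⟨hj, by simpa using hij⟩, hx.symm⟩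

-- argmin properties
theorem pvArgmin_spec (maxs : List Int) :
    pvArgmin maxs < max maxs.length 1 ∧
      ∀ j < maxs.length, maxs.getD (pvArgmin maxs) 0 ≤ maxs.getD j 0 := by
  unfold pvArgmin
  induction maxs.length with
  | zero => simp
  | succ m ih =>
    rw [List.range_succ, List.foldl_append]
    obtain ⟨ih1, ih2⟩ := ih
    set jm := (List.range m).foldl
      (fun j1 j => if maxs.getD j 0 < maxs.getD j1 0 then j else j1) 0 with hjm
    simp only [List.foldl]
    by_cases h : maxs.getD m 0 < maxs.getD jm 0
    · simp only [if_pos h]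
      refine ⟨by omega, ?_⟩
      intro j hj
      rcases Nat.lt_succ_iff_lt_or_eq.mp hj with hj' | hj'
      · exact le_trans (le_of_lt h) (ih2 j hj')
      · subst hj'; exact le_refl _
    · simp only [if_neg h]
      refine ⟨by omega, ?_⟩
      intro j hj
      rcases Nat.lt_succ_iff_lt_or_eq.mp hj with hj' | hj'
      · exact ih2 j hj'
      · subst hj'; omega

-- ===== VERDICT lemma: B computes the min of pvL =====
theorem mem_mapFilterRange {xs : List Int} {j1 : Nat} {y : Int} :
    y ∈ ((List.range xs.length).filter (fun j => j ≠ j1)).map (fun j => xs.getD j 0) ↔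
      ∃ j < xs.length, j ≠ j1 ∧ xs.getD j 0 = y := by
  simp only [List.mem_map, List.mem_filter, List.mem_range, decide_eq_true_eq]
  constructor
  · rintro ⟨j, ⟨hj, hne⟩, hy⟩; exact ⟨j, hj, hne, hy⟩
  · rintro ⟨j, hj, hne, hy⟩; exact ⟨j, ⟨hj, hne⟩, hy⟩

theorem B_eq_min (mins maxs : List Int) :
    overlapDistance_alt mins maxs = (pvL mins maxs).min? := by
  by_cases hm : mins = []
  · subst hm; simp [overlapDistance_alt, pvL]
  by_cases hx : maxs = []
  · subst hx
    have h0 : pvL mins [] = [] :=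
      List.flatMap_eq_nil_iff.mpr (by intro _ _; rfl)
    simp [overlapDistance_alt, h0]
  have hmE : mins.isEmpty = false := by simp [hm]
  have hxE : maxs.isEmpty = false := by simp [hx]
  have hn : 0 < mins.length := List.length_pos_iff.mpr hm
  have hmL : 0 < maxs.length := List.length_pos_iff.mpr hx
  rw [overlapDistance_alt]
  rw [hmE, hxE]
  simp only [Bool.or_self, Bool.false_eq_true, if_false]
  obtain ⟨hj1lt, hj1min⟩ := pvArgmin_spec maxs
  set j1 := pvArgmin maxs with hj1def
  have hj1m : j1 < maxs.length := by omega
  set m1 := maxs.getD j1 0 with hm1def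
  set M2l := ((List.range maxs.length).filter (fun j => j ≠ j1)).map
      (fun j => maxs.getD j 0) with hM2def
  set B1l := ((List.range mins.length).filter (fun i => i ≠ j1)).map
      (fun i => mins.getD i 0) with hB1def
  -- membership in pvL, specialised
  have hLmem : ∀ {i j : Nat}, i < mins.length → j < maxs.length → i ≠ j →
      maxs.getD j 0 - mins.getD i 0 ∈ pvL mins maxs := by
    intro i j hi hj hij
    exact mem_pvL.mpr ⟨i, hi, j, hj, hij, rfl⟩
  have min?_one : ∀ a : Int, ([a] : List Int).min? = some a := fun _ => rfl
  have min?_two : ∀ a c : Int, ([a, c] : List Int).min? = some (min a c) := fun _ _ => rfl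
  rcases hb : B1l.max? with _ | b <;> rcases h2 : M2l.min? with _ | v2 <;> dsimp only
  · -- no valid i ≠ j1 in mins and no valid j ≠ j1 in maxs: no pair exists at all
    have hB1 := List.max?_eq_none_iff.mp hb
    have hM2 := List.min?_eq_none_iff.mp h2
    have hLnil : pvL mins maxs = [] := by
      rw [List.eq_nil_iff_forall_not_mem]
      intro x hxL
      obtain ⟨i, hi, j, hj, hij, _⟩ := mem_pvL.mp hxL
      by_cases hi1 : i = j1
      · have : maxs.getD j 0 ∈ M2l := mem_mapFilterRange.mpr ⟨j, hj, by omega, rfl⟩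
        simp [hM2] at this
      · have : mins.getD i 0 ∈ B1l := mem_mapFilterRange.mpr ⟨i, hi, hi1, rfl⟩
        simp [hB1] at this
    simp [hLnil]
  · -- only the runner-up candidate exists
    have hB1 := List.max?_eq_none_iff.mp hb
    obtain ⟨hv2mem, hv2le⟩ := List.min?_eq_some_iff.mp h2
    have hj1n : j1 < mins.length := by
      by_contra hc
      have h0 : (0 : Nat) ≠ j1 := by omega
      have : mins.getD 0 0 ∈ B1l := mem_mapFilterRange.mpr ⟨0, hn, h0, rfl⟩
      simp [hB1] at this
    obtain ⟨j, hj, hjne, hjv⟩ := mem_mapFilterRange.mp hv2mem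
    rw [if_pos hj1n, List.nil_append, min?_one]
    symm
    apply List.min?_eq_some_iff.mpr
    refine ⟨by rw [← hjv]; exact hLmem hj1n hj (by omega), ?_⟩
    intro y hy
    obtain ⟨i', hi', j', hj', hij', hyv⟩ := mem_pvL.mp hy
    have hi1 : i' = j1 := by
      by_contra hc
      have : mins.getD i' 0 ∈ B1l := mem_mapFilterRange.mpr ⟨i', hi', hc, rfl⟩
      simp [hB1] at this
    have : v2 ≤ maxs.getD j' 0 :=
      hv2le _ (mem_mapFilterRange.mpr ⟨j', hj', by omega, rfl⟩)
    subst hi1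
    omega
  · -- only the m1 candidate exists
    have hM2 := List.min?_eq_none_iff.mp h2
    obtain ⟨hbmem, hble⟩ := List.max?_eq_some_iff.mp hb
    obtain ⟨i, hi, hine, hib⟩ := mem_mapFilterRange.mp hbmem
    rw [List.append_nil, min?_one]
    symm
    apply List.min?_eq_some_iff.mpr
    refine ⟨by rw [← hib]; exact hLmem hi hj1m hine, ?_⟩
    intro y hy
    obtain ⟨i', hi', j', hj', hij', hyv⟩ := mem_pvL.mp hy
    have hj'1 : j' = j1 := by
      by_contra hc
      have : maxs.getD j' 0 ∈ M2l := mem_mapFilterRange.mpr ⟨j', hj', hc, rfl⟩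
      simp [hM2] at this
    have : mins.getD i' 0 ≤ b :=
      hble _ (mem_mapFilterRange.mpr ⟨i', hi', by omega, rfl⟩)
    subst hj'1
    omega
  · -- both summaries exist
    obtain ⟨hbmem, hble⟩ := List.max?_eq_some_iff.mp hb
    obtain ⟨hv2mem, hv2le⟩ := List.min?_eq_some_iff.mp h2
    obtain ⟨i, hi, hine, hib⟩ := mem_mapFilterRange.mp hbmem
    obtain ⟨j, hj, hjne, hjv⟩ := mem_mapFilterRange.mp hv2mem
    have hlb : ∀ y ∈ pvL mins maxs,
        m1 - b ≤ y ∨ (j1 < mins.length ∧ v2 - mins.getD j1 0 ≤ y) := by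
      intro y hy
      obtain ⟨i', hi', j', hj', hij', hyv⟩ := mem_pvL.mp hy
      by_cases hc : i' = j1
      · right
        refine ⟨by omega, ?_⟩
        have : v2 ≤ maxs.getD j' 0 :=
          hv2le _ (mem_mapFilterRange.mpr ⟨j', hj', by omega, rfl⟩)
        subst hc
        omega
      · left
        have h1 : mins.getD i' 0 ≤ b :=
          hble _ (mem_mapFilterRange.mpr ⟨i', hi', hc, rfl⟩)
        have h2' : m1 ≤ maxs.getD j' 0 := hj1min j' hj'
        omega
    have hmem1 : m1 - b ∈ pvL mins maxs := by rw [← hib]; exact hLmem hi hj1m hine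
    by_cases hj1n : j1 < mins.length
    · have hmem2 : v2 - mins.getD j1 0 ∈ pvL mins maxs := by
        rw [← hjv]; exact hLmem hj1n hj (by omega)
      rw [if_pos hj1n, List.cons_append, List.nil_append, min?_two]
      symm
      apply List.min?_eq_some_iff.mpr
      constructor
      · rw [min_def]; split_ifs <;> assumption
      · intro y hy
        rcases hlb y hy with h | ⟨_, h⟩ <;> rw [min_def] <;> split_ifs <;> omega
    · rw [if_neg hj1n, List.append_nil, min?_one]
      symm
      apply List.min?_eq_some_iff.mpr
      refine ⟨hmem1, ?_⟩
      intro y hy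
      rcases hlb y hy with h | ⟨h', _⟩
      · exact h
      · omega

-- ===== VERDICT (by name: the statement is the Claim_ definition above) =====
theorem overlapDistance_spec : Claim_equal_overlapDistance := by
  intro mins maxs _
  unfold Spec_overlapDistance
  rw [A_eq_min, B_eq_min]
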